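-- pv_equiv track=rewrite | github.com/JieWangnk/aortacfd-agent | paper_digest/corpus.py | _unlatex
-- ===== SOURCE A (Python) =====
-- def _unlatex(s: str) -> str:
--     """Undo the most common BibTeX diacritic escapes from the corpus JSON.
--
--     The bib store serves authors verbatim from ``references.bib``, which
--     uses LaTeX syntax like ``B{\"u}chner`` and ``Sa{\\~n}a``. Render these
--     as their actual Unicode characters so the digest doesn't leak markup.
--     """
--     if not s:
--         return s
--     # Accented letters: {\"u} → ü, etc. Handle the small set that actually
--     # appears in the current bibliography.
--     replacements = {
--         '{\\"a}': "ä", '{\\"o}': "ö", '{\\"u}': "ü",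
--         '{\\"A}': "Ä", '{\\"O}': "Ö", '{\\"U}': "Ü",
--         "{\\'a}": "á", "{\\'e}": "é", "{\\'i}": "í",
--         "{\\'o}": "ó", "{\\'u}": "ú",
--         "{\\^a}": "â", "{\\^e}": "ê", "{\\^i}": "î",
--         "{\\^o}": "ô", "{\\^u}": "û",
--         "{\\~n}": "ñ", "{\\~a}": "ã", "{\\~o}": "õ",
--         "{\\c c}": "ç", "{\\c C}": "Ç",
--     }
--     for k, v in replacements.items():
--         s = s.replace(k, v)
--     # Strip any remaining bare braces
--     return s.replace("{", "").replace("}", "")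
-- ===== SOURCE B (Python) =====
-- # Single left-to-right scan: at each '{' try the escape table once, otherwise
-- # copy chars and drop bare braces -- one pass instead of 23 sequential .replace passes.
--
-- _TABLE = [
--     ('\\"a}', "ä"), ('\\"o}', "ö"), ('\\"u}', "ü"),
--     ('\\"A}', "Ä"), ('\\"O}', "Ö"), ('\\"U}', "Ü"),
--     ("\\'a}", "á"), ("\\'e}", "é"), ("\\'i}", "í"),
--     ("\\'o}", "ó"), ("\\'u}", "ú"),
--     ("\\^a}", "â"), ("\\^e}", "ê"), ("\\^i}", "î"),
--     ("\\^o}", "ô"), ("\\^u}", "û"),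
--     ("\\~n}", "ñ"), ("\\~a}", "ã"), ("\\~o}", "õ"),
--     ("\\c c}", "ç"), ("\\c C}", "Ç"),
-- ]
--
--
-- def _unlatex(s: str) -> str:
--     out = []
--     i, n = 0, len(s)
--     while i < n:
--         c = s[i]
--         i += 1
--         if c == '{':
--             for tail, ch in _TABLE:
--                 if s.startswith(tail, i):
--                     out.append(ch)
--                     i += len(tail)
--                     break
--         elif c != '}':
--             out.append(c)
--     return ''.join(out)
-- ===== Notes on version B (the rewrite author's own statement) =====
-- stated objective: alternative
-- what changed: Replaces A's 21 sequential whole-string .replace passes plus two brace-stripping passes by a single left-to-right scan that, at each opening brace, looks up one escape from a table (the keys are mutually prefix-free, so one pass suffices) and drops bare braces on the fly.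
import Mathlib
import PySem

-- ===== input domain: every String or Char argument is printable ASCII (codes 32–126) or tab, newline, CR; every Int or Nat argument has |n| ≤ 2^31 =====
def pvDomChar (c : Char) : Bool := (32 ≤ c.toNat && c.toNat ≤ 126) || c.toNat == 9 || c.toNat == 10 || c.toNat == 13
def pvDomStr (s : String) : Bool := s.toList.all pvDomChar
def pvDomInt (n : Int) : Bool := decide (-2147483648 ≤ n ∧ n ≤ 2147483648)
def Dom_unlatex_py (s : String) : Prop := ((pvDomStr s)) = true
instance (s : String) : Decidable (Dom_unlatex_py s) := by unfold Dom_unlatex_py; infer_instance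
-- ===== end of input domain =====

-- B replaces A's 21 sequential whole-string `.replace` passes (plus two brace-stripping
-- passes) by ONE left-to-right scan over the characters; objective: alternative.

-- ===== PORT A =====
-- the `replacements` dict literal of A (distinct keys, insertion order), as an association list
def replacementsA : List (String × String) :=
  [("{\\\"a}", "ä"), ("{\\\"o}", "ö"), ("{\\\"u}", "ü"),
   ("{\\\"A}", "Ä"), ("{\\\"O}", "Ö"), ("{\\\"U}", "Ü"),
   ("{\\'a}", "á"), ("{\\'e}", "é"), ("{\\'i}", "í"),
   ("{\\'o}", "ó"), ("{\\'u}", "ú"),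
   ("{\\^a}", "â"), ("{\\^e}", "ê"), ("{\\^i}", "î"),
   ("{\\^o}", "ô"), ("{\\^u}", "û"),
   ("{\\~n}", "ñ"), ("{\\~a}", "ã"), ("{\\~o}", "õ"),
   ("{\\c c}", "ç"), ("{\\c C}", "Ç")]

def unlatex_py (s : String) : String :=
  if s.toList = [] then s                -- `if not s: return s`
  else
    -- `for k, v in replacements.items(): s = s.replace(k, v)`
    let s1 := replacementsA.foldl (fun t kv => PySem.Str.replace t kv.1 kv.2) s
    -- `return s.replace("{", "").replace("}", "")`
    PySem.Str.replace (PySem.Str.replace s1 "{" "") "}" ""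

-- ===== PORT B =====
-- Source B's `_TABLE`: (key tail after the leading '{', replacement character)
def charTable : List (List Char × Char) :=
  [(['\\', '"', 'a', '}'], 'ä'), (['\\', '"', 'o', '}'], 'ö'), (['\\', '"', 'u', '}'], 'ü'),
   (['\\', '"', 'A', '}'], 'Ä'), (['\\', '"', 'O', '}'], 'Ö'), (['\\', '"', 'U', '}'], 'Ü'),
   (['\\', '\'', 'a', '}'], 'á'), (['\\', '\'', 'e', '}'], 'é'), (['\\', '\'', 'i', '}'], 'í'),
   (['\\', '\'', 'o', '}'], 'ó'), (['\\', '\'', 'u', '}'], 'ú'),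
   (['\\', '^', 'a', '}'], 'â'), (['\\', '^', 'e', '}'], 'ê'), (['\\', '^', 'i', '}'], 'î'),
   (['\\', '^', 'o', '}'], 'ô'), (['\\', '^', 'u', '}'], 'û'),
   (['\\', '~', 'n', '}'], 'ñ'), (['\\', '~', 'a', '}'], 'ã'), (['\\', '~', 'o', '}'], 'õ'),
   (['\\', 'c', ' ', 'c', '}'], 'ç'), (['\\', 'c', ' ', 'C', '}'], 'Ç')]

-- `for tail, ch in _TABLE: if s.startswith(tail, i): ... break` — first matching entry
def tryKey (cs : List Char) : Option (List Char × Char) :=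
  charTable.find? (fun p => p.1.isPrefixOf cs)

-- Source B's while loop over index i; fuel = number of remaining loop iterations bound (≥ length)
def scanBGo : Nat → List Char → List Char
  | 0, _ => []
  | _, [] => []
  | fuel + 1, c :: cs =>
    if c = '{' then
      match tryKey cs with
      | some p => p.2 :: scanBGo fuel (cs.drop p.1.length)
      | none => scanBGo fuel cs
    else if c = '}' then scanBGo fuel cs
    else c :: scanBGo fuel cs

def unlatex_py_alt (s : String) : String :=
  String.ofList (scanBGo s.toList.length s.toList)

-- ===== PRECONDITION & SPEC =====
def Spec_unlatex_py (s : String) (out : String) : Prop := out = unlatex_py_alt s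
instance (s : String) (out : String) : Decidable (Spec_unlatex_py s out) := by unfold Spec_unlatex_py; infer_instance

-- ===== CLAIM (what is proved, stated in full; the proofs are below) =====
def Claim_equal_unlatex_py : Prop := ∀ (s : String), Dom_unlatex_py s → Spec_unlatex_py s (unlatex_py s)

-- ===== LEMMAS AND PROOFS =====

-- proof-side model of Python's str.replace with a nonempty pattern c0::t
def repl1 (c0 : Char) (t new : List Char) : List Char → List Char
  | [] => []
  | c :: cs =>
    if (c0 :: t).isPrefixOf (c :: cs) then new ++ repl1 c0 t new (cs.drop t.length)
    else c :: repl1 c0 t new cs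
termination_by l => l.length
decreasing_by
  · simp only [List.length_cons, List.length_drop]; omega
  · simp only [List.length_cons]; omega

-- A's 21-replace fold, on the char level
def chainRep (ps : List (List Char × Char)) (l : List Char) : List Char :=
  ps.foldl (fun s p => repl1 '{' p.1 [p.2] s) l

-- A's final `.replace("{","").replace("}","")`
def stripB (l : List Char) : List Char :=
  repl1 '}' [] [] (repl1 '{' [] [] l)

theorem repl1_nil (c0 : Char) (t new : List Char) : repl1 c0 t new [] = [] := by
  simp [repl1]

theorem repl1_cons_pos (c0 : Char) (t new : List Char) (c : Char) (cs : List Char)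
    (h : (c0 :: t).isPrefixOf (c :: cs) = true) :
    repl1 c0 t new (c :: cs) = new ++ repl1 c0 t new (cs.drop t.length) := by
  simp [repl1, h]

theorem repl1_cons_neg (c0 : Char) (t new : List Char) (c : Char) (cs : List Char)
    (h : ¬ (c0 :: t).isPrefixOf (c :: cs) = true) :
    repl1 c0 t new (c :: cs) = c :: repl1 c0 t new cs := by
  simp [repl1, h]

theorem isPrefixOf_cons_ne {c0 c : Char} (t cs : List Char) (h : c ≠ c0) :
    (c0 :: t).isPrefixOf (c :: cs) = false := by
  simp only [List.isPrefixOf, Bool.and_eq_false_iff]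
  left; simp [Ne.symm h]

theorem replace_go_eq (c0 : Char) (t new : List Char) :
    ∀ (fuel : Nat) (l acc : List Char), l.length ≤ fuel →
      PySem.Chars.replace.go (c0 :: t) new fuel l acc = acc.reverse ++ repl1 c0 t new l := by
  intro fuel
  induction fuel with
  | zero =>
    intro l acc hl
    have : l = [] := List.length_eq_zero_iff.mp (Nat.le_zero.mp hl)
    subst this
    simp [PySem.Chars.replace.go, repl1_nil]
  | succ fuel ih =>
    intro l acc hl
    cases l with
    | nil => simp [PySem.Chars.replace.go, repl1_nil]
    | cons c cs =>
      by_cases h : (c0 :: t).isPrefixOf (c :: cs) = true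
      · have hdrop : (c :: cs).drop (c0 :: t).length = cs.drop t.length := by
          simp
        rw [repl1_cons_pos c0 t new c cs h]
        simp only [PySem.Chars.replace.go, h, if_pos, hdrop]
        rw [ih (cs.drop t.length) (new.reverse ++ acc)
          (by simp only [List.length_drop]; simp at hl; omega)]
        simp
      · rw [repl1_cons_neg c0 t new c cs h]
        simp only [PySem.Chars.replace.go, h]
        rw [if_neg (by simp), ih cs (c :: acc) (by simp at hl; omega)]
        simp

theorem replace_eq (c0 : Char) (t new l : List Char) :
    PySem.Chars.replace l (c0 :: t) new = repl1 c0 t new l := by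
  rw [PySem.Chars.replace]
  simp only [List.isEmpty_cons, if_false, Bool.false_eq_true]
  simpa using replace_go_eq c0 t new l.length l [] le_rfl

-- bridge: A's String-level fold = char-level fold
theorem foldl_replace_toList (ps : List (String × String)) (s : String) :
    (ps.foldl (fun t kv => PySem.Str.replace t kv.1 kv.2) s).toList
      = (ps.map (fun kv => (kv.1.toList, kv.2.toList))).foldl
          (fun l kv => PySem.Chars.replace l kv.1 kv.2) s.toList := by
  induction ps generalizing s with
  | nil => rfl
  | cons p ps ih => simp [List.foldl_cons, ih, PySem.Str.toList_replace]

theorem foldl_chars_replace (tb : List (List Char × Char)) (l : List Char) :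
    (tb.map (fun p => (('{' :: p.1 : List Char), ([p.2] : List Char)))).foldl
        (fun s kv => PySem.Chars.replace s kv.1 kv.2) l = chainRep tb l := by
  induction tb generalizing l with
  | nil => rfl
  | cons p tb ih => simp [chainRep, List.foldl_cons, replace_eq, ih]

theorem chainRep_nil (ps : List (List Char × Char)) : chainRep ps [] = [] := by
  induction ps with
  | nil => rfl
  | cons p ps ih => simp [chainRep, List.foldl_cons, repl1_nil] at ih ⊢; exact ih

theorem A_toList (s : String) :
    (unlatex_py s).toList = stripB (chainRep charTable s.toList) := by
  rw [unlatex_py]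
  by_cases h : s.toList = []
  · rw [if_pos h, h, chainRep_nil, stripB]
    simp [repl1_nil]
  · rw [if_neg h]
    simp only [PySem.Str.toList_replace, foldl_replace_toList]
    have hmap : replacementsA.map (fun kv => (kv.1.toList, kv.2.toList))
        = charTable.map (fun p => (('{' :: p.1 : List Char), ([p.2] : List Char))) := by rfl
    rw [hmap, foldl_chars_replace, stripB,
      show ("{".toList) = ('{' :: ([] : List Char)) from rfl,
      show ("}".toList) = ('}' :: ([] : List Char)) from rfl,
      show ("".toList) = ([] : List Char) from rfl, replace_eq, replace_eq]

-- no replacement can start inside a block of characters all different from the pattern head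
theorem repl1_copy (c0 : Char) (t new : List Char) :
    ∀ (x z : List Char), (∀ a ∈ x, a ≠ c0) →
      repl1 c0 t new (x ++ z) = x ++ repl1 c0 t new z := by
  intro x
  induction x with
  | nil => intro z _; rfl
  | cons a x ih =>
    intro z hx
    have hne : a ≠ c0 := hx a (List.mem_cons_self)
    rw [List.cons_append, repl1_cons_neg c0 t new a (x ++ z)
      (by rw [isPrefixOf_cons_ne t (x ++ z) hne]; simp),
      ih z (fun b hb => hx b (List.mem_cons_of_mem a hb)), List.cons_append]

-- an ASCII prefix of a replace-output (non-ASCII replacement char) was a prefix of the input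
theorem ascii_prefix_back (c0 : Char) (t' : List Char) (v : Char) (hv : 127 < v.toNat) :
    ∀ (n : Nat) (l tp : List Char), l.length ≤ n → (∀ a ∈ tp, a.toNat < 128) →
      tp.isPrefixOf (repl1 c0 t' [v] l) = true → tp.isPrefixOf l = true := by
  intro n
  induction n with
  | zero =>
    intro l tp hl _ h
    have : l = [] := List.length_eq_zero_iff.mp (Nat.le_zero.mp hl)
    subst this
    simpa [repl1_nil] using h
  | succ n ih =>
    intro l tp hl hascii h
    cases l with
    | nil => simpa [repl1_nil] using h
    | cons c cs =>
      cases tp with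
      | nil => simp [List.isPrefixOf]
      | cons a tp =>
        by_cases hp : (c0 :: t').isPrefixOf (c :: cs) = true
        · rw [repl1_cons_pos c0 t' [v] c cs hp, List.singleton_append] at h
          have ha : a.toNat < 128 := hascii a (List.mem_cons_self)
          simp only [List.isPrefixOf, Bool.and_eq_true, beq_iff_eq] at h
          exfalso; rw [h.1] at ha; omega
        · rw [repl1_cons_neg c0 t' [v] c cs hp] at h
          simp only [List.isPrefixOf, Bool.and_eq_true] at h ⊢
          refine ⟨h.1, ?_⟩
          exact ih cs tp (by simp at hl; omega)
            (fun b hb => hascii b (List.mem_cons_of_mem a hb)) h.2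

theorem chain_nohead (ps : List (List Char × Char)) (c : Char) (hc : c ≠ '{') :
    ∀ cs, chainRep ps (c :: cs) = c :: chainRep ps cs := by
  induction ps with
  | nil => intro cs; rfl
  | cons p ps ih =>
    intro cs
    show chainRep ps (repl1 '{' p.1 [p.2] (c :: cs)) = c :: chainRep ps (repl1 '{' p.1 [p.2] cs)
    rw [repl1_cons_neg '{' p.1 [p.2] c cs
      (by rw [isPrefixOf_cons_ne p.1 cs hc]; simp), ih]

theorem chain_brace (ps : List (List Char × Char))
    (hta : ∀ p ∈ ps, ∀ a ∈ p.1, a.toNat < 128) (hv : ∀ p ∈ ps, 127 < p.2.toNat) :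
    ∀ cs, (∀ p ∈ ps, ¬ p.1.isPrefixOf cs = true) →
      chainRep ps ('{' :: cs) = '{' :: chainRep ps cs := by
  induction ps with
  | nil => intro cs _; rfl
  | cons p ps ih =>
    intro cs hcs
    show chainRep ps (repl1 '{' p.1 [p.2] ('{' :: cs)) = '{' :: chainRep ps (repl1 '{' p.1 [p.2] cs)
    have hnp : ¬ ('{' :: p.1).isPrefixOf ('{' :: cs) = true := by
      simp only [List.isPrefixOf, Bool.and_eq_true]
      rintro ⟨-, h2⟩
      exact hcs p (List.mem_cons_self) h2
    rw [repl1_cons_neg '{' p.1 [p.2] '{' cs hnp]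
    refine ih (fun q hq => hta q (List.mem_cons_of_mem p hq))
      (fun q hq => hv q (List.mem_cons_of_mem p hq)) _ ?_
    intro q hq hpre
    exact hcs q (List.mem_cons_of_mem p hq)
      (ascii_prefix_back '{' p.1 p.2 (hv p List.mem_cons_self) cs.length cs q.1 le_rfl
        (hta q (List.mem_cons_of_mem p hq)) hpre)

theorem chain_copy (ps : List (List Char × Char)) :
    ∀ (x z : List Char), (∀ a ∈ x, a ≠ '{') →
      chainRep ps (x ++ z) = x ++ chainRep ps z := by
  induction ps with
  | nil => intro x z _; rfl
  | cons p ps ih =>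
    intro x z hx
    show chainRep ps (repl1 '{' p.1 [p.2] (x ++ z)) = x ++ chainRep ps (repl1 '{' p.1 [p.2] z)
    rw [repl1_copy '{' p.1 [p.2] x z hx, ih x _ hx]

-- the hit case: the found entry fires, everything else passes through
theorem chain_hit (pre post : List (List Char × Char)) (t : List Char) (v : Char)
    (rest : List Char)
    (hta : ∀ p ∈ pre, ∀ a ∈ p.1, a.toNat < 128) (hvp : ∀ p ∈ pre, 127 < p.2.toNat)
    (ht : ∀ a ∈ t, a ≠ '{') (hv : v ≠ '{')
    (hpre : ∀ p ∈ pre, ¬ p.1.isPrefixOf (t ++ rest) = true) :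
    chainRep (pre ++ (t, v) :: post) ('{' :: (t ++ rest))
      = v :: chainRep (pre ++ (t, v) :: post) rest := by
  have hsplit : ∀ w, chainRep (pre ++ (t, v) :: post) w
      = chainRep post (repl1 '{' t [v] (chainRep pre w)) := by
    intro w; rw [chainRep, List.foldl_append]; rfl
  rw [hsplit, chain_brace pre hta hvp _ hpre, chain_copy pre t rest ht]
  have hpref : ('{' :: t).isPrefixOf ('{' :: (t ++ chainRep pre rest)) = true := by
    rw [List.isPrefixOf_iff_prefix]
    exact ⟨chainRep pre rest, by simp⟩
  rw [repl1_cons_pos '{' t [v] '{' (t ++ chainRep pre rest) hpref, List.drop_left,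
    List.singleton_append, chain_nohead post v hv, hsplit]

theorem stripB_nil : stripB [] = [] := by simp [stripB, repl1_nil]
theorem stripB_lbrace (x : List Char) : stripB ('{' :: x) = stripB x := by
  rw [stripB, repl1_cons_pos '{' [] [] '{' x (by simp [List.isPrefixOf])]
  simp [stripB]
theorem stripB_rbrace (x : List Char) : stripB ('}' :: x) = stripB x := by
  rw [stripB, repl1_cons_neg '{' [] [] '}' x (by rw [isPrefixOf_cons_ne [] x (by decide)]; simp),
    repl1_cons_pos '}' [] [] '}' (repl1 '{' [] [] x) (by simp [List.isPrefixOf])]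
  simp [stripB]
theorem stripB_cons (c : Char) (x : List Char) (h1 : c ≠ '{') (h2 : c ≠ '}') :
    stripB (c :: x) = c :: stripB x := by
  rw [stripB, repl1_cons_neg '{' [] [] c x (by rw [isPrefixOf_cons_ne [] x h1]; simp),
    repl1_cons_neg '}' [] [] c (repl1 '{' [] [] x) (by rw [isPrefixOf_cons_ne _ _ h2]; simp)]
  rfl

-- table facts
theorem table_tails_ascii : ∀ p ∈ charTable, ∀ a ∈ p.1, a.toNat < 128 := by
  have h : charTable.all (fun p => p.1.all (fun a => decide (a.toNat < 128))) = true := by rfl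
  simpa [List.all_eq_true] using h

theorem table_vals_nonascii : ∀ p ∈ charTable, 127 < p.2.toNat := by
  have h : charTable.all (fun p => decide (127 < p.2.toNat)) = true := by rfl
  simpa [List.all_eq_true] using h

theorem table_tails_nobrace : ∀ p ∈ charTable, ∀ a ∈ p.1, a ≠ '{' := by
  have h : charTable.all (fun p => p.1.all (fun a => a ≠ '{')) = true := by rfl
  simpa [List.all_eq_true] using h

-- the main equivalence, by induction on the fuel
theorem main_eq : ∀ (fuel : Nat) (l : List Char), l.length ≤ fuel →
    stripB (chainRep charTable l) = scanBGo fuel l := by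
  intro fuel
  induction fuel with
  | zero =>
    intro l hl
    have : l = [] := List.length_eq_zero_iff.mp (Nat.le_zero.mp hl)
    subst this
    rw [chainRep_nil, stripB_nil]; rfl
  | succ fuel ih =>
    intro l hl
    cases l with
    | nil => rw [chainRep_nil, stripB_nil]; rfl
    | cons c cs =>
      have hcs : cs.length ≤ fuel := by simp at hl; omega
      by_cases hc : c = '{'
      · subst hc
        cases htk : tryKey cs with
        | some p =>
          obtain ⟨t, v⟩ := p
          obtain ⟨hp, pre, post, htb, hprefail⟩ :=
            List.find?_eq_some_iff_append.mp (by simpa [tryKey] using htk)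
          obtain ⟨rest, hrest⟩ := List.isPrefixOf_iff_prefix.mp hp
          have hts : t ++ rest = cs := hrest
          have hmem : ((t, v) : List Char × Char) ∈ charTable := by
            rw [htb]; exact List.mem_append_right _ List.mem_cons_self
          have hvna : 127 < v.toNat := table_vals_nonascii _ hmem
          have hlb : ('{' : Char).toNat = 123 := rfl
          have hrb : ('}' : Char).toNat = 125 := rfl
          have hv1 : v ≠ '{' := by intro h; rw [h, hlb] at hvna; omega
          have hv2 : v ≠ '}' := by intro h; rw [h, hrb] at hvna; omega
          have hscan : scanBGo (fuel + 1) ('{' :: cs) = v :: scanBGo fuel (cs.drop t.length) := by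
            simp [scanBGo, htk]
          have hdrop : cs.drop t.length = rest := by rw [← hts, List.drop_left]
          have hchain : stripB (chainRep charTable ('{' :: cs))
              = v :: stripB (chainRep charTable rest) := by
            rw [← hts, htb,
              chain_hit pre post t v rest
                (fun q hq => table_tails_ascii q (htb ▸ List.mem_append_left _ hq))
                (fun q hq => table_vals_nonascii q (htb ▸ List.mem_append_left _ hq))
                (fun a ha => table_tails_nobrace _ hmem a ha) hv1
                (fun q hq => by
                  have h2 : q.1.isPrefixOf cs = false := by simpa using hprefail q hq
                  rw [hts, h2]; simp),
              stripB_cons v _ hv1 hv2, ← htb]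
          rw [hchain, hscan, hdrop, ih rest (by
            have : rest.length ≤ cs.length := by rw [← hts]; simp
            omega)]
        | none =>
          have hfail : ∀ q ∈ charTable, ¬ q.1.isPrefixOf cs = true := by
            intro q hq
            have h2 := List.find?_eq_none.mp
              (show charTable.find? (fun p => p.1.isPrefixOf cs) = none from htk) q hq
            simpa using h2
          have hscan : scanBGo (fuel + 1) ('{' :: cs) = scanBGo fuel cs := by
            simp [scanBGo, htk]
          rw [chain_brace charTable table_tails_ascii table_vals_nonascii cs hfail,
            stripB_lbrace, hscan]
          exact ih cs hcs
      · by_cases hc2 : c = '}'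
        · subst hc2
          have hscan : scanBGo (fuel + 1) ('}' :: cs) = scanBGo fuel cs := by
            simp [scanBGo]
          rw [chain_nohead charTable '}' (by decide) cs, stripB_rbrace, hscan]
          exact ih cs hcs
        · have hscan : scanBGo (fuel + 1) (c :: cs) = c :: scanBGo fuel cs := by
            simp only [scanBGo, if_neg hc, if_neg hc2]
          rw [chain_nohead charTable c hc cs, stripB_cons c _ hc hc2, hscan, ih cs hcs]

-- ===== VERDICT (by name: the statement is the Claim_ definition above) =====
theorem unlatex_py_spec : Claim_equal_unlatex_py := by
  intro s _
  unfold Spec_unlatex_py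
  apply String.ext
  rw [A_toList, unlatex_py_alt, main_eq s.toList.length s.toList le_rfl,
    String.toList_ofList]
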